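-- pv_equiv track=rewrite | github.com/WayBro-54/algoritm | codewars/matrix.py | switch_gravity
-- ===== SOURCE A (Python) =====
-- def switch_gravity(blocks):
--     rows, cols = len(blocks), len(blocks[0])
--
--     for c in range(cols):
--         row_idx = rows - 1
--         for r in range(rows - 1, -1, -1):
--             if blocks[r][c] == "#":
--                 blocks[r][c] = "-"
--                 blocks[row_idx][c] = "#"
--                 row_idx -= 1
--
--     return blocks
-- ===== SOURCE B (Python) =====
-- def switch_gravity(blocks):
--     # Same return value and same in-place mutation as A; count-and-rebuild per column.
--     rows, cols = len(blocks), len(blocks[0])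
--     for c in range(cols):
--         k = sum(1 for r in range(rows) if blocks[r][c] == "#")
--         for r in range(rows):
--             if r >= rows - k:
--                 blocks[r][c] = "#"
--             elif blocks[r][c] == "#":
--                 blocks[r][c] = "-"
--     return blocks
-- ===== Notes on version B (the rewrite author's own statement) =====
-- stated objective: alternative
-- what changed: Replaces A's reverse-scan two-pointer sink (stateful write cursor moving upward) by a per-column count of '#' cells followed by a single forward reconstruction pass that writes '#' into the bottom k rows and maps '#' to '-' above.
import Mathlib
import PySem

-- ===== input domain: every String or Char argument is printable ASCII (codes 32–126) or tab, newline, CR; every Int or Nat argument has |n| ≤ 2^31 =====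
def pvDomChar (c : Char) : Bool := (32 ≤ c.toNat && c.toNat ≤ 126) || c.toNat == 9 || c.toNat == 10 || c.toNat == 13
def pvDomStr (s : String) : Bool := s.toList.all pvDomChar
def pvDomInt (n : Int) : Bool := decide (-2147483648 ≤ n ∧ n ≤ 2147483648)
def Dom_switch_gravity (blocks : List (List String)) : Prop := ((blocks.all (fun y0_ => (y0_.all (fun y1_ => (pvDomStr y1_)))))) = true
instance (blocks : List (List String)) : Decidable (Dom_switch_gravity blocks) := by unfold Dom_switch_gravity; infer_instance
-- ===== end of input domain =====

-- B replaces A's reverse-scan two-pointer sink by a per-column '#' count plus a forward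
-- reconstruction pass (same cost); both Pythons mutate `blocks` in place and return it —
-- the equivalence proved here is about the returned value.

-- ===== PORT A =====
-- blocks[r][c] read; out-of-range (IndexError) is excluded by Pre_, the default "" is never reached there
def pvGetCell (m : List (List String)) (r c : Int) : String :=
  PySem.List.pyGetD (PySem.List.pyGetD m r []) c ""

-- blocks[r][c] = v write; negative/out-of-range never occurs inside Pre_
def pvSetCell (m : List (List String)) (r c : Int) (v : String) : List (List String) :=
  if 0 ≤ r ∧ 0 ≤ c then m.set r.toNat ((m.getD r.toNat []).set c.toNat v) else m

-- body of A's inner loop: state = (blocks, row_idx)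
def pvSinkA (c : Nat) (p : List (List String) × Int) (r : Int) : List (List String) × Int :=
  if pvGetCell p.1 r (c : Int) = "#" then
    (pvSetCell (pvSetCell p.1 r (c : Int) "-") p.2 (c : Int) "#", p.2 - 1)
  else p

def switch_gravity (blocks : List (List String)) : List (List String) :=
  let rows := blocks.length
  let cols := (blocks.headD []).length
  (List.range cols).foldl
    (fun m c =>
      ((PySem.List.pyRange ((rows : Int) - 1) (-1) (-1)).foldl (pvSinkA c)
        (m, (rows : Int) - 1)).1)
    blocks

-- ===== PORT B =====
-- k = number of '#' cells of column c (B's generator-sum)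
def pvKcount (m : List (List String)) (rows c : Nat) : Nat :=
  (List.range rows).countP (fun (r : Nat) => decide (pvGetCell m (r : Int) (c : Int) = "#"))

-- body of B's rebuild loop
def pvFillB (rows k c : Nat) (m : List (List String)) (r : Nat) : List (List String) :=
  if (rows : Int) - (k : Int) ≤ (r : Int) then pvSetCell m (r : Int) (c : Int) "#"
  else if pvGetCell m (r : Int) (c : Int) = "#" then pvSetCell m (r : Int) (c : Int) "-"
  else m

def switch_gravity_alt (blocks : List (List String)) : List (List String) :=
  let rows := blocks.length
  let cols := (blocks.headD []).length
  (List.range cols).foldl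
    (fun m (c : Nat) =>
      (List.range rows).foldl (pvFillB rows (pvKcount m rows c) c) m)
    blocks

-- ===== PRECONDITION & SPEC =====
-- Pre_ excludes exactly the inputs on which the Python raises IndexError: the empty matrix
-- (blocks[0]) and ragged matrices where some row is shorter than row 0 (blocks[r][c]).
def Pre_switch_gravity (blocks : List (List String)) : Prop :=
  blocks ≠ [] ∧ ∀ row ∈ blocks, (blocks.headD []).length ≤ row.length

instance (blocks : List (List String)) : Decidable (Pre_switch_gravity blocks) := by
  unfold Pre_switch_gravity; infer_instance

def pvWitness_switch_gravity : List (List String) := [["#", "-"], ["-", "x"]]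

def Spec_switch_gravity (blocks : List (List String)) (out : List (List String)) : Prop := out = switch_gravity_alt blocks
instance (blocks : List (List String)) (out : List (List String)) : Decidable (Spec_switch_gravity blocks out) := by unfold Spec_switch_gravity; infer_instance

-- ===== CLAIM (what is proved, stated in full; the proofs are below) =====
def Claim_equal_switch_gravity : Prop := ∀ (blocks : List (List String)), Dom_switch_gravity blocks → Pre_switch_gravity blocks → Spec_switch_gravity blocks (switch_gravity blocks)

-- ===== LEMMAS AND PROOFS =====

-- Nat-index cell read/write used by the proofs
def gcell (m : List (List String)) (r c : Nat) : String := (m.getD r []).getD c ""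
def scell (m : List (List String)) (r c : Nat) (v : String) : List (List String) :=
  m.set r ((m.getD r []).set c v)

theorem pvGetCell_nat (m : List (List String)) (r c : Nat) :
    pvGetCell m (r : Int) (c : Int) = gcell m r c := by
  simp [pvGetCell, gcell, PySem.List.pyGetD_natCast]

theorem pvSetCell_nat (m : List (List String)) (r c : Nat) (v : String) :
    pvSetCell m (r : Int) (c : Int) v = scell m r c v := by
  simp [pvSetCell, scell]

theorem length_scell (m : List (List String)) (r c : Nat) (v : String) :
    (scell m r c v).length = m.length := by
  simp [scell]

theorem gcell_scell_ne (m : List (List String)) (r c : Nat) (v : String)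
    (i c' : Nat) (hne : i ≠ r) : gcell (scell m r c v) i c' = gcell m i c' := by
  simp [gcell, scell, List.getElem?_set_ne (Ne.symm hne)]

theorem scell_scell (m : List (List String)) (r c : Nat) (v w : String) :
    scell (scell m r c v) r c w = scell m r c w := by
  by_cases hr : r < m.length
  · simp [scell, List.getElem?_set_self (by simpa using hr), List.set_set,
      List.getElem?_eq_getElem hr]
  · unfold scell
    rw [List.set_eq_of_length_le (by simp; omega), List.set_eq_of_length_le (by omega),
      List.set_eq_of_length_le (by omega)]

-- count of '#' cells of column c among rows < r
def kpre (m : List (List String)) (c r : Nat) : Nat :=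
  (List.range r).countP (fun i => decide (gcell m i c = "#"))

theorem kpre_succ (m : List (List String)) (c r : Nat) :
    kpre m c (r + 1) = kpre m c r + (if gcell m r c = "#" then 1 else 0) := by
  simp [kpre, List.range_succ, List.countP_append]

theorem kpre_congr (m m' : List (List String)) (c r : Nat)
    (h : ∀ i < r, gcell m i c = gcell m' i c) : kpre m c r = kpre m' c r := by
  unfold kpre
  exact List.countP_congr (fun i hi => by
    have := h i (List.mem_range.mp hi); simp [this])

-- getElem? forms of the scell lemmas
theorem scell_getElem?_ne (m : List (List String)) (r c : Nat) (v : String)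
    (i : Nat) (hne : i ≠ r) : (scell m r c v)[i]? = m[i]? := by
  simp [scell, List.getElem?_set_ne (Ne.symm hne)]

theorem scell_getElem?_self (m : List (List String)) (r c : Nat) (v : String)
    (hr : r < m.length) : (scell m r c v)[r]? = some (m[r].set c v) := by
  simp [scell, List.getElem?_set_self (by simpa using hr), List.getElem?_eq_getElem hr]

theorem pvSetCell_nonneg (m : List (List String)) (idx : Int) (c : Nat) (v : String)
    (h : 0 ≤ idx) : pvSetCell m idx (c : Int) v = scell m idx.toNat c v := by
  simp [pvSetCell, scell, h]

-- The A-side inner loop, characterised: row_idx ends at idx minus the number of '#' cells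
-- among rows < r of column c, the window (idx-k, idx] of column c is set to '#', the
-- remaining '#' cells among rows < r are set to '-', everything else is untouched.
theorem sinkA_spec (c : Nat) : ∀ (r : Nat) (m : List (List String)) (idx : Int),
    (r : Int) ≤ idx + 1 → idx < (m.length : Int) →
    ((PySem.List.pyRange ((r : Int) - 1) (-1) (-1)).foldl (pvSinkA c) (m, idx)).2
        = idx - kpre m c r ∧
    ((PySem.List.pyRange ((r : Int) - 1) (-1) (-1)).foldl (pvSinkA c) (m, idx)).1.length
        = m.length ∧
    ∀ i, (hi : i < m.length) →
      ((PySem.List.pyRange ((r : Int) - 1) (-1) (-1)).foldl (pvSinkA c) (m, idx)).1[i]?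
        = some (if idx - kpre m c r < (i : Int) ∧ (i : Int) ≤ idx then m[i].set c "#"
                else if i < r ∧ gcell m i c = "#" then m[i].set c "-"
                else m[i]) := by
  intro r
  induction r with
  | zero =>
    intro m idx _ _
    rw [show ((0 : Nat) : Int) - 1 = -1 by norm_num, PySem.List.pyRange_neg_one_eq_nil le_rfl]
    refine ⟨by simp [kpre], rfl, fun i hi => ?_⟩
    have hk0 : kpre m c 0 = 0 := by simp [kpre]
    rw [hk0]
    rw [if_neg (by omega), if_neg (by omega)]
    simp [List.getElem?_eq_getElem hi]
  | succ r ih =>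
    intro m idx hr hidx
    have hr' : (r : Int) ≤ idx := by push_cast at hr ⊢; omega
    have h0 : (0 : Int) ≤ idx := le_trans (by positivity) hr'
    rw [show ((r + 1 : Nat) : Int) - 1 = (r : Int) by push_cast; ring,
      PySem.List.pyRange_neg_one_cons (by omega), List.foldl_cons]
    by_cases hpos : gcell m r c = "#"
    · -- blocks[r][c] == "#": write '-' at r, '#' at idx, decrement idx
      have hstep : pvSinkA c (m, idx) (r : Int)
          = (scell (scell m r c "-") idx.toNat c "#", idx - 1) := by
        simp [pvSinkA, pvGetCell_nat, pvSetCell_nat, hpos, pvSetCell_nonneg _ _ _ _ h0]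
      rw [hstep]
      set mm := scell (scell m r c "-") idx.toNat c "#" with hmm
      have hlen : mm.length = m.length := by simp [hmm, length_scell]
      obtain ⟨ih2, ihlen, ihel⟩ := ih mm (idx - 1) (by omega) (by rw [hlen]; omega)
      have hidxn : idx.toNat < m.length := by omega
      have hik : ∀ i < r, gcell mm i c = gcell m i c := by
        intro i hi
        rw [hmm, gcell_scell_ne _ _ _ _ _ _ (by omega), gcell_scell_ne _ _ _ _ _ _ (by omega)]
      have hkp : kpre mm c r = kpre m c r := kpre_congr _ _ _ _ (fun i hi => hik i hi)
      have hks : kpre m c (r + 1) = kpre m c r + 1 := by rw [kpre_succ, if_pos hpos]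
      refine ⟨by rw [ih2, hkp, hks]; push_cast; ring, by rw [ihlen, hlen], fun i hi => ?_⟩
      have hi' : i < mm.length := by omega
      rw [ihel i hi', hkp, hks]
      -- translate mm's entries back to m's
      by_cases hieq : i = idx.toNat
      · subst hieq
        have hmmi : mm[idx.toNat]? = some (m[idx.toNat].set c "#") := by
          by_cases hri : r = idx.toNat
          · subst hri
            rw [hmm, scell_scell, scell_getElem?_self _ _ _ _ (by omega)]
          · have h1 : (scell m r c "-")[idx.toNat]? = m[idx.toNat]? :=
              scell_getElem?_ne _ _ _ _ _ (Ne.symm hri)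
            have hlt : idx.toNat < (scell m r c "-").length := by
              simpa [length_scell] using hidxn
            have h2 : (scell m r c "-")[idx.toNat]'hlt = m[idx.toNat] := by
              rw [List.getElem?_eq_getElem hlt, List.getElem?_eq_getElem hidxn] at h1
              exact Option.some_injective _ h1
            rw [hmm, scell_getElem?_self _ _ _ _ hlt, h2]
        rw [List.getElem?_eq_getElem hi'] at hmmi
        have hmv : mm[idx.toNat]'hi' = m[idx.toNat].set c "#" := Option.some_injective _ hmmi
        have c1 : ¬ (idx - 1 - ((kpre m c r : Nat) : Int) < ((idx.toNat : Nat) : Int)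
            ∧ ((idx.toNat : Nat) : Int) ≤ idx - 1) := by rintro ⟨_, hh⟩; omega
        have c2 : ¬ (idx.toNat < r ∧ gcell mm idx.toNat c = "#") := by rintro ⟨hh, _⟩; omega
        have c3 : idx - ((kpre m c r + 1 : Nat) : Int) < ((idx.toNat : Nat) : Int)
            ∧ ((idx.toNat : Nat) : Int) ≤ idx := by constructor <;> omega
        rw [hmv, if_neg c1, if_neg c2, if_pos c3]
      · have hne : (i : Int) ≠ idx := by omega
        by_cases hri : i = r
        · subst hri
          have hrlt : i < idx.toNat := by omega
          have hmmi : mm[i]? = some (m[i].set c "-") := by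
            rw [hmm, scell_getElem?_ne _ _ _ _ _ hieq, scell_getElem?_self _ _ _ _ hi]
          rw [List.getElem?_eq_getElem hi'] at hmmi
          have hmv : mm[i]'hi' = m[i].set c "-" := Option.some_injective _ hmmi
          rw [hmv]
          by_cases hwl : idx - 1 - ((kpre m c i : Nat) : Int) < (i : Int)
          · have c1 : idx - 1 - ((kpre m c i : Nat) : Int) < (i : Int) ∧ (i : Int) ≤ idx - 1 :=
              ⟨hwl, by omega⟩
            have c2 : idx - ((kpre m c i + 1 : Nat) : Int) < (i : Int) ∧ (i : Int) ≤ idx := by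
              constructor <;> omega
            rw [if_pos c1, List.set_set, if_pos c2]
          · have c1 : ¬ (idx - 1 - ((kpre m c i : Nat) : Int) < (i : Int) ∧ (i : Int) ≤ idx - 1) := by
              rintro ⟨hh, _⟩; omega
            have c2 : ¬ (i < i ∧ gcell mm i c = "#") := by rintro ⟨hh, _⟩; omega
            have c3 : ¬ (idx - ((kpre m c i + 1 : Nat) : Int) < (i : Int) ∧ (i : Int) ≤ idx) := by
              rintro ⟨hh, _⟩; omega
            rw [if_neg c1, if_neg c2, if_neg c3, if_pos ⟨Nat.lt_succ_self i, hpos⟩]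
        · have hmmi : mm[i]? = m[i]? := by
            rw [hmm, scell_getElem?_ne _ _ _ _ _ hieq, scell_getElem?_ne _ _ _ _ _ hri]
          rw [List.getElem?_eq_getElem hi', List.getElem?_eq_getElem hi] at hmmi
          have hmv : mm[i]'hi' = m[i] := Option.some_injective _ hmmi
          rw [hmv]
          by_cases hir : i < r
          · have hgeq := hik i hir
            rw [hgeq]
            by_cases hwl : idx - 1 - ((kpre m c r : Nat) : Int) < (i : Int)
            · have c1 : idx - 1 - ((kpre m c r : Nat) : Int) < (i : Int) ∧ (i : Int) ≤ idx - 1 :=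
                ⟨hwl, by omega⟩
              have c2 : idx - ((kpre m c r + 1 : Nat) : Int) < (i : Int) ∧ (i : Int) ≤ idx := by
                constructor <;> omega
              rw [if_pos c1, if_pos c2]
            · have c1 : ¬ (idx - 1 - ((kpre m c r : Nat) : Int) < (i : Int) ∧ (i : Int) ≤ idx - 1) := by
                rintro ⟨hh, _⟩; omega
              have c3 : ¬ (idx - ((kpre m c r + 1 : Nat) : Int) < (i : Int) ∧ (i : Int) ≤ idx) := by
                rintro ⟨hh, _⟩; omega
              rw [if_neg c1, if_neg c3]
              by_cases hg : gcell m i c = "#"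
              · rw [if_pos ⟨hir, hg⟩, if_pos ⟨Nat.lt_succ_of_lt hir, hg⟩]
              · rw [if_neg (fun hh => hg hh.2), if_neg (fun hh => hg hh.2)]
          · by_cases hw : idx - 1 - ((kpre m c r : Nat) : Int) < (i : Int) ∧ (i : Int) ≤ idx - 1
            · have c2 : idx - ((kpre m c r + 1 : Nat) : Int) < (i : Int) ∧ (i : Int) ≤ idx := by
                obtain ⟨h1, h2⟩ := hw; constructor <;> omega
              rw [if_pos hw, if_pos c2]
            · have c2 : ¬ (i < r ∧ gcell mm i c = "#") := by rintro ⟨hh, _⟩; omega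
              have c3 : ¬ (idx - ((kpre m c r + 1 : Nat) : Int) < (i : Int) ∧ (i : Int) ≤ idx) := by
                rintro ⟨h1, h2⟩; exact hw ⟨by omega, by omega⟩
              have c4 : ¬ (i < r + 1 ∧ gcell m i c = "#") := by rintro ⟨hh, _⟩; omega
              rw [if_neg hw, if_neg c2, if_neg c3, if_neg c4]
    · -- blocks[r][c] != "#": no-op step
      have hstep : pvSinkA c (m, idx) (r : Int) = (m, idx) := by
        simp only [pvSinkA, pvGetCell_nat]
        rw [if_neg hpos]
      rw [hstep]
      obtain ⟨ih2, ihlen, ihel⟩ := ih m idx (by omega) hidx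
      have hks : kpre m c (r + 1) = kpre m c r := by rw [kpre_succ, if_neg hpos]; rfl
      refine ⟨by rw [ih2, hks], ihlen, fun i hi => ?_⟩
      rw [ihel i hi, hks]
      congr 1
      by_cases hw : idx - ((kpre m c r : Nat) : Int) < (i : Int) ∧ (i : Int) ≤ idx
      · rw [if_pos hw, if_pos hw]
      · rw [if_neg hw, if_neg hw]
        by_cases hb : i < r ∧ gcell m i c = "#"
        · rw [if_pos hb, if_pos ⟨Nat.lt_succ_of_lt hb.1, hb.2⟩]
        · have c4 : ¬ (i < r + 1 ∧ gcell m i c = "#") := by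
            rintro ⟨h1, h2⟩
            rcases Nat.lt_succ_iff_lt_or_eq.mp h1 with h | h
            · exact hb ⟨h, h2⟩
            · subst h; exact hpos h2
          rw [if_neg hb, if_neg c4]

-- The B-side rebuild loop, characterised.
theorem fillB_spec (rows k c : Nat) (m : List (List String)) : ∀ (r : Nat),
    ((List.range r).foldl (pvFillB rows k c) m).length = m.length ∧
    ∀ i, (hi : i < m.length) →
      ((List.range r).foldl (pvFillB rows k c) m)[i]?
        = some (if i < r then
                  (if (rows : Int) - (k : Int) ≤ (i : Int) then m[i].set c "#"
                   else if gcell m i c = "#" then m[i].set c "-" else m[i])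
                else m[i]) := by
  intro r
  induction r with
  | zero =>
    exact ⟨rfl, fun i hi => by simp [List.getElem?_eq_getElem hi]⟩
  | succ r ih =>
    obtain ⟨ihlen, ihel⟩ := ih
    rw [List.range_succ, List.foldl_append, List.foldl_cons, List.foldl_nil]
    set F := (List.range r).foldl (pvFillB rows k c) m with hF
    have hFr : F[r]? = m[r]? := by
      by_cases hr : r < m.length
      · rw [ihel r hr, if_neg (Nat.lt_irrefl r), List.getElem?_eq_getElem hr]
      · rw [List.getElem?_eq_none (by omega), List.getElem?_eq_none (by omega)]
    have hgFr : gcell F r c = gcell m r c := by simp [gcell, hFr]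
    by_cases hcond : (rows : Int) - (k : Int) ≤ (r : Int)
    · have hstep : pvFillB rows k c F r = scell F r c "#" := by
        rw [pvFillB, if_pos hcond, pvSetCell_nat]
      rw [hstep]
      refine ⟨by rw [length_scell, ihlen], fun i hi => ?_⟩
      by_cases hir : i = r
      · subst hir
        rw [scell_getElem?_self _ _ _ _ (by omega),
          show F[i] = m[i] from by
            have := hFr; rw [List.getElem?_eq_getElem hi, List.getElem?_eq_getElem (show i < F.length by omega)] at this
            exact Option.some_injective _ this,
          if_pos (Nat.lt_succ_self i), if_pos hcond]
      · rw [scell_getElem?_ne _ _ _ _ _ hir, ihel i hi]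
        congr 1
        by_cases hilt : i < r
        · rw [if_pos hilt, if_pos (Nat.lt_succ_of_lt hilt)]
        · rw [if_neg hilt, if_neg (show ¬ i < r + 1 by omega)]
    · rw [show pvFillB rows k c F r
          = if gcell F r c = "#" then scell F r c "-" else F from by
        rw [pvFillB, if_neg hcond, pvGetCell_nat, pvSetCell_nat]]
      by_cases hg : gcell F r c = "#"
      · rw [if_pos hg]
        refine ⟨by rw [length_scell, ihlen], fun i hi => ?_⟩
        by_cases hir : i = r
        · subst hir
          rw [scell_getElem?_self _ _ _ _ (by omega),
            show F[i] = m[i] from by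
              have := hFr; rw [List.getElem?_eq_getElem hi, List.getElem?_eq_getElem (show i < F.length by omega)] at this
              exact Option.some_injective _ this,
            if_pos (Nat.lt_succ_self i), if_neg hcond, if_pos (hgFr.symm.trans hg)]
        · rw [scell_getElem?_ne _ _ _ _ _ hir, ihel i hi]
          congr 1
          by_cases hilt : i < r
          · rw [if_pos hilt, if_pos (Nat.lt_succ_of_lt hilt)]
          · rw [if_neg hilt, if_neg (show ¬ i < r + 1 by omega)]
      · rw [if_neg hg]
        refine ⟨ihlen, fun i hi => ?_⟩
        rw [ihel i hi]
        congr 1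
        by_cases hir : i = r
        · subst hir
          rw [if_neg (Nat.lt_irrefl i), if_pos (Nat.lt_succ_self i), if_neg hcond,
            if_neg (fun hh => hg (hgFr.trans hh))]
        · by_cases hilt : i < r
          · rw [if_pos hilt, if_pos (Nat.lt_succ_of_lt hilt)]
          · rw [if_neg hilt, if_neg (show ¬ i < r + 1 by omega)]

-- one column pass of A equals one column pass of B
theorem col_eq (c : Nat) (m : List (List String)) :
    ((PySem.List.pyRange ((m.length : Int) - 1) (-1) (-1)).foldl (pvSinkA c)
        (m, (m.length : Int) - 1)).1
      = (List.range m.length).foldl (pvFillB m.length (pvKcount m m.length c) c) m := by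
  have hk : pvKcount m m.length c = kpre m c m.length := by
    unfold pvKcount kpre
    exact List.countP_congr (fun i _ => by rw [pvGetCell_nat])
  obtain ⟨_, halen, hael⟩ :=
    sinkA_spec c m.length m ((m.length : Int) - 1) (by omega) (by omega)
  obtain ⟨hblen, hbel⟩ := fillB_spec m.length (pvKcount m m.length c) c m m.length
  apply List.ext_getElem?
  intro i
  by_cases hi : i < m.length
  · rw [hael i hi, hbel i hi, hk]
    congr 1
    rw [if_pos hi]
    by_cases hw : ((m.length : Nat) : Int) - ((kpre m c m.length : Nat) : Int) ≤ (i : Int)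
    · have c1 : ((m.length : Nat) : Int) - 1 - ((kpre m c m.length : Nat) : Int) < (i : Int)
          ∧ (i : Int) ≤ ((m.length : Nat) : Int) - 1 := ⟨by omega, by omega⟩
      rw [if_pos c1, if_pos hw]
    · have c1 : ¬ (((m.length : Nat) : Int) - 1 - ((kpre m c m.length : Nat) : Int) < (i : Int)
          ∧ (i : Int) ≤ ((m.length : Nat) : Int) - 1) := by rintro ⟨ha, hb⟩; omega
      rw [if_neg c1, if_neg hw]
      by_cases hg : gcell m i c = "#"
      · rw [if_pos ⟨hi, hg⟩, if_pos hg]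
      · rw [if_neg (fun hh => hg hh.2), if_neg hg]
  · rw [List.getElem?_eq_none (by omega), List.getElem?_eq_none (by omega)]

theorem outer_eq (rows : Nat) : ∀ (L : List Nat) (m : List (List String)), m.length = rows →
    L.foldl (fun m c =>
        ((PySem.List.pyRange ((rows : Int) - 1) (-1) (-1)).foldl (pvSinkA c)
          (m, (rows : Int) - 1)).1) m
      = L.foldl (fun m c =>
          (List.range rows).foldl (pvFillB rows (pvKcount m rows c) c) m) m := by
  intro L
  induction L with
  | nil => intro m _; rfl
  | cons c L ih =>
    intro m hm
    subst hm
    rw [List.foldl_cons, List.foldl_cons, col_eq c m]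
    exact ih _ ((fillB_spec m.length (pvKcount m m.length c) c m m.length).1)

-- ===== VERDICT (by name: the statement is the Claim_ definition above) =====
theorem switch_gravity_spec : Claim_equal_switch_gravity := by
  intro blocks _ _
  unfold Spec_switch_gravity switch_gravity switch_gravity_alt
  exact outer_eq blocks.length (List.range ((blocks.headD []).length)) blocks rfl
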